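-- pv_equiv track=rewrite | github.com/RyanGrieb/ExamGenerator | backend/src/async_actions/pdf_processing.py | text_has_multiple_choice
-- ===== SOURCE A (Python) =====
-- def text_has_multiple_choice(text: str) -> bool:
--     """
--     Check if text has A) B) C) D) options
--     """
--     open_p_count = 0
--     # FIXME: Check letter prefix.
--     for i in range(0, len(text)):
--         character = text[i]
--         if character == "(":
--             open_p_count += 1
--         if character == ")":
--             open_p_count -= 1
--
--     return open_p_count < 0
-- ===== SOURCE B (Python) =====
-- def text_has_multiple_choice(text: str) -> bool:
--     """
--     Check if text has A) B) C) D) options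
--     """
--     # Matching-based check: cancel each ")" against a pending unmatched "("
--     # when possible; otherwise it is an unmatched close.  Matched pairs add
--     # equally to both totals, so closes exceed opens exactly when the
--     # unmatched closes exceed the unmatched opens left over.
--     unmatched_open = 0
--     unmatched_close = 0
--     for character in text:
--         if character == "(":
--             unmatched_open += 1
--         elif character == ")":
--             if unmatched_open > 0:
--                 unmatched_open -= 1
--             else:
--                 unmatched_close += 1
--     return unmatched_close > unmatched_open
-- ===== Notes on version B (the rewrite author's own statement) =====
-- stated objective: alternative
-- what changed: Replaces the single running signed balance (final sign tested) with a matching algorithm that cancels each close against a pending unmatched open and compares the two leftover unmatched counts; matched pairs contribute equally, so the comparison agrees with A's final sign.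
import Mathlib
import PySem

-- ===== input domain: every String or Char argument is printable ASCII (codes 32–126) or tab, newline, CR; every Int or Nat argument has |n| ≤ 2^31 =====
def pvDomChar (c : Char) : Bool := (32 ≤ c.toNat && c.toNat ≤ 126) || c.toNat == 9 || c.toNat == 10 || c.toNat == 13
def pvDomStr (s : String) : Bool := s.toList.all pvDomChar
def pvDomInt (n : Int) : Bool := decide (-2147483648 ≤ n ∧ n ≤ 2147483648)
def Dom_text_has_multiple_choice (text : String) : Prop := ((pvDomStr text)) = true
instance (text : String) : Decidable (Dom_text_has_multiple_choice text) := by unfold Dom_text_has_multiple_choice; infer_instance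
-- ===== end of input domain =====

-- B replaces A's single running signed balance with a matching pass that cancels each close
-- against a pending unmatched open and compares the two leftover unmatched counts (alternative).

-- ===== PORT A =====
-- for i in range(0, len(text)): character = text[i]; if '(': +=1; if ')': -=1; return open_p_count < 0
def text_has_multiple_choice (text : String) : Bool :=
  let open_p_count : Int :=
    (PySem.List.pyRange 0 (PySem.Str.len text)).foldl
      (fun acc i =>
        let character := PySem.List.pyGetD text.toList i ' '
        let acc := if character = '(' then acc + 1 else acc
        if character = ')' then acc - 1 else acc)
      0
  decide (open_p_count < 0)

-- ===== PORT B =====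
-- for character in text: '(' → open+1; ')' → cancel a pending open if any, else close+1;
-- return unmatched_close > unmatched_open
def text_has_multiple_choice_alt (text : String) : Bool :=
  let r : Int × Int :=
    text.toList.foldl
      (fun (st : Int × Int) character =>
        if character = '(' then (st.1 + 1, st.2)
        else if character = ')' then
          (if st.1 > 0 then (st.1 - 1, st.2) else (st.1, st.2 + 1))
        else st)
      (0, 0)
  decide (r.2 > r.1)

-- ===== PRECONDITION & SPEC =====
def Spec_text_has_multiple_choice (text : String) (out : Bool) : Prop := out = text_has_multiple_choice_alt text
instance (text : String) (out : Bool) : Decidable (Spec_text_has_multiple_choice text out) := by unfold Spec_text_has_multiple_choice; infer_instance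

-- ===== CLAIM (what is proved, stated in full; the proofs are below) =====
def Claim_equal_text_has_multiple_choice : Prop := ∀ (text : String), Dom_text_has_multiple_choice text → Spec_text_has_multiple_choice text (text_has_multiple_choice text)

-- ===== LEMMAS AND PROOFS =====

-- A's balance loop computes init + count '(' − count ')'
theorem pv_foldl_balance (l : List Char) (init : Int) :
    l.foldl
      (fun acc character =>
        let acc := if character = '(' then acc + 1 else acc
        if character = ')' then acc - 1 else acc)
      init = init + (l.count '(' : Int) - (l.count ')' : Int) := by
  induction l generalizing init with
  | nil => simp
  | cons c t ih =>
    simp only [List.foldl_cons, ih, List.count_cons]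
    by_cases h1 : c = '(' <;> by_cases h2 : c = ')' <;>
      simp [h1, h2] <;> ring

-- B's matching loop: the difference (unmatched_open − unmatched_close) equals the signed balance
theorem pv_foldl_match (l : List Char) (st : Int × Int) :
    (l.foldl
      (fun (st : Int × Int) character =>
        if character = '(' then (st.1 + 1, st.2)
        else if character = ')' then
          (if st.1 > 0 then (st.1 - 1, st.2) else (st.1, st.2 + 1))
        else st)
      st).1 -
    (l.foldl
      (fun (st : Int × Int) character =>
        if character = '(' then (st.1 + 1, st.2)
        else if character = ')' then
          (if st.1 > 0 then (st.1 - 1, st.2) else (st.1, st.2 + 1))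
        else st)
      st).2 = st.1 - st.2 + (l.count '(' : Int) - (l.count ')' : Int) := by
  induction l generalizing st with
  | nil => simp
  | cons c t ih =>
    simp only [List.foldl_cons, List.count_cons, ih]
    split_ifs <;> (try simp_all) <;> omega

-- ===== VERDICT (by name: the statement is the Claim_ definition above) =====
theorem text_has_multiple_choice_spec : Claim_equal_text_has_multiple_choice := by
  intro text _
  unfold Spec_text_has_multiple_choice text_has_multiple_choice text_has_multiple_choice_alt
  have hlen : PySem.Str.len text = PySem.List.len text.toList := by
    simp [PySem.Str.len_eq, PySem.List.len]
  rw [hlen]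
  have hloop := PySem.List.foldl_pyRange_pyGetD text.toList ' '
    (fun acc character =>
      let acc := if character = '(' then acc + (1 : Int) else acc
      if character = ')' then acc - 1 else acc) 0 (a := 0) (by norm_num)
  change decide (List.foldl (fun acc j =>
      (fun acc character =>
        let acc := if character = '(' then acc + (1 : Int) else acc
        if character = ')' then acc - 1 else acc) acc (PySem.List.pyGetD text.toList j ' '))
      0 (PySem.List.pyRange 0 (PySem.List.len text.toList)) < 0) = _
  rw [hloop]
  simp only [Int.toNat_zero, List.drop_zero, pv_foldl_balance]
  have hm := pv_foldl_match text.toList (0, 0)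
  simp only [decide_eq_decide]
  omega
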